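-- pv_equiv track=rewrite | github.com/Alys9999/ICS33 | exam/e1/exam/exam.py | resupply
-- ===== SOURCE A (Python) =====
-- def resupply  (db : {str:{str:int}},   must_have : int)  ->  {str: {(str,int)}}:
--     re_d={}
--     for x in db.keys():
--         for y in db[x].keys():
--             if db[x][y]<3:
--                 num=3-int(db[x][y])
--                 if y not in re_d.keys():
--                     tu=((x,num))
--                     s=set()
--                     s.add(tu)
--                     re_d[y]=s
--                 else:
--                     co=set(re_d[y])
--                     tu=(x,num)
--                     co.add(tu)
--                     re_d[y]=co
--             else:
--                 continue
--     return re_d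
-- ===== SOURCE B (Python) =====
-- def resupply(db: {str: {str: int}}, must_have: int) -> {str: {(str, int)}}:
--     # Per-product rescan: first list the deficient products (first-appearance
--     # order), then for each one gather its deficient suppliers by scanning db.
--     # Like the original, the threshold is the literal 3; must_have is unused.
--     deficient = [y for x in db for y in db[x] if db[x][y] < 3]
--     products = list(dict.fromkeys(deficient))
--     return {y: {(x, 3 - db[x][y]) for x in db if y in db[x] and db[x][y] < 3}
--             for y in products}
-- ===== Notes on version B (the rewrite author's own statement) =====
-- stated objective: alternative
-- what changed: Replaces the single grouping pass that mutates a dict of sets with an inverted two-phase traversal: first collect the deduplicated list of deficient products, then build each product's supplier set by a fresh scan over all suppliers; Pre_ only excludes association lists with duplicate supplier or product keys, which do not encode any Python dict input.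
import Mathlib
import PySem

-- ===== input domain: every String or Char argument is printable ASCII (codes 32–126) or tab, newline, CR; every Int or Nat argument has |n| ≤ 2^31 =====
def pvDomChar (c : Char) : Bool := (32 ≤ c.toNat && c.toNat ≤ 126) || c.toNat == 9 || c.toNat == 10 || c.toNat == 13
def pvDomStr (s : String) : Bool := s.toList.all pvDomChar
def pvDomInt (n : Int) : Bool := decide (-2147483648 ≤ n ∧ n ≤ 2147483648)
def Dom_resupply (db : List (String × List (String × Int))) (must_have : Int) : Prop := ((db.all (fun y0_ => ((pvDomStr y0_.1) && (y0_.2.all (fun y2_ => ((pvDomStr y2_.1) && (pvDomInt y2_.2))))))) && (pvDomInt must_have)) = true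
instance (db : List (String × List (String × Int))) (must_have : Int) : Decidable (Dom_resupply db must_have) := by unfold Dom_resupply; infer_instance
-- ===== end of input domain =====

-- B replaces A's single grouping pass that mutates a dict of sets by an inverted two-phase
-- traversal: dedup the deficient products, then rescan the suppliers per product
-- (objective: alternative). Like A, B ignores must_have (A hardcodes the threshold 3).

-- ===== PORT A =====
def resupply (db : List (String × List (String × Int))) (must_have : Int) : List (String × List (String × Int)) :=
  let dbD : PySem.Dict String (List (String × Int)) := PySem.Dict.mk db
  (dbD.keys.foldl (fun re_d x =>
    let innerD : PySem.Dict String Int := PySem.Dict.mk (dbD.getD x [])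
    innerD.keys.foldl (fun re_d y =>
      if innerD.getD y 0 < 3 then
        let num : Int := 3 - innerD.getD y 0
        if ¬ re_d.contains y then
          re_d.insert y (PySem.Set.add PySem.Set.empty (x, num))
        else
          re_d.insert y (PySem.Set.add (PySem.Set.ofList (re_d.getD y [])) (x, num))
      else re_d) re_d)
    (PySem.Dict.empty : PySem.Dict String (List (String × Int)))).items

-- ===== PORT B =====
def resupply_alt (db : List (String × List (String × Int))) (must_have : Int) : List (String × List (String × Int)) :=
  let dbD : PySem.Dict String (List (String × Int)) := PySem.Dict.mk db
  let deficient : List String := dbD.keys.flatMap (fun x =>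
    let innerD : PySem.Dict String Int := PySem.Dict.mk (dbD.getD x [])
    innerD.keys.filter (fun y => innerD.getD y 0 < 3))
  let products : List String := PySem.List.dedup deficient
  products.map (fun y => (y,
    (PySem.Set.ofList (dbD.keys.filterMap (fun x =>
      let innerD : PySem.Dict String Int := PySem.Dict.mk (dbD.getD x [])
      if innerD.contains y && innerD.getD y 0 < 3 then some (x, 3 - innerD.getD y 0)
      else none)) : List (String × Int))))

-- ===== PRECONDITION & SPEC =====
-- Pre_ excludes only association lists with duplicate supplier keys or duplicate product keys
-- inside a supplier: those do not encode any Python dict input (A's parameter is a dict of dicts).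
def Pre_resupply (db : List (String × List (String × Int))) (must_have : Int) : Prop :=
  (db.map (·.1)).Nodup ∧ ∀ p ∈ db, (p.2.map (·.1)).Nodup
instance (db : List (String × List (String × Int))) (must_have : Int) : Decidable (Pre_resupply db must_have) := by unfold Pre_resupply; infer_instance
def pvWitness_resupply : (List (String × List (String × Int))) × Int :=
  ([("a", [("p", 1), ("q", 5)]), ("b", [("p", 2)])], 3)

def Spec_resupply (db : List (String × List (String × Int))) (must_have : Int) (out : List (String × List (String × Int))) : Prop := out = resupply_alt db must_have
instance (db : List (String × List (String × Int))) (must_have : Int) (out : List (String × List (String × Int))) : Decidable (Spec_resupply db must_have out) := by unfold Spec_resupply; infer_instance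

-- ===== CLAIM (what is proved, stated in full; the proofs are below) =====
def Claim_equal_resupply : Prop := ∀ (db : List (String × List (String × Int))) (must_have : Int), Dom_resupply db must_have → Pre_resupply db must_have → Spec_resupply db must_have (resupply db must_have)

-- ===== LEMMAS AND PROOFS =====

def pvGA (d : PySem.Dict String (List (String × Int))) (e : String × (String × Int)) :
    PySem.Dict String (List (String × Int)) :=
  if ¬ d.contains e.1 then d.insert e.1 (PySem.Set.add PySem.Set.empty e.2)
  else d.insert e.1 (PySem.Set.add (PySem.Set.ofList (d.getD e.1 [])) e.2)

def pvGM (d : PySem.Dict String (List (String × Int))) (e : String × (String × Int)) :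
    PySem.Dict String (List (String × Int)) :=
  d.modify e.1 [] (fun s => PySem.Set.add s e.2)

def pvFp (p : String × List (String × Int)) : List (String × (String × Int)) :=
  (p.2.filter (fun q => q.2 < 3)).map (fun q => (q.1, (p.1, 3 - q.2)))

def pvE (db : List (String × List (String × Int))) : List (String × (String × Int)) :=
  db.flatMap pvFp

theorem pv_foldl_guard {σ τ δ : Type} (l : List σ) (c : σ → Prop) [DecidablePred c]
    (e : σ → τ) (g : δ → τ → δ) (d : δ) :
    l.foldl (fun d q => if c q then g d (e q) else d) d
      = ((l.filter (fun q => c q)).map e).foldl g d := by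
  induction l generalizing d with
  | nil => rfl
  | cons q l ih => by_cases h : c q <;> simp [h, ih]

theorem pv_A_norm (db : List (String × List (String × Int))) (mh : Int)
    (hdb : (db.map (·.1)).Nodup) (hin : ∀ p ∈ db, (p.2.map (·.1)).Nodup) :
    resupply db mh = ((pvE db).foldl pvGA PySem.Dict.empty).items := by
  unfold resupply
  dsimp only
  rw [PySem.Dict.keys_mk, List.foldl_map]
  rw [pvE, List.foldl_flatMap]
  congr 1
  apply List.foldl_ext
  intro d p hp
  have hv : (PySem.Dict.mk db).getD p.1 [] = p.2 :=
    PySem.Dict.getD_of_mem_items _ hp (by rw [PySem.Dict.keys_mk]; exact hdb) []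
  rw [hv, PySem.Dict.keys_mk, List.foldl_map]
  have hbody : ∀ (d : PySem.Dict String (List (String × Int))) (q : String × Int), q ∈ p.2 →
      (if (PySem.Dict.mk p.2).getD q.1 0 < 3 then
        (if ¬ d.contains q.1 then d.insert q.1 (PySem.Set.add PySem.Set.empty (p.1, 3 - (PySem.Dict.mk p.2).getD q.1 0))
         else d.insert q.1 (PySem.Set.add (PySem.Set.ofList (d.getD q.1 [])) (p.1, 3 - (PySem.Dict.mk p.2).getD q.1 0)))
       else d)
      = (if q.2 < 3 then pvGA d (q.1, (p.1, 3 - q.2)) else d) := by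
    intro d q hq
    have hv2 : (PySem.Dict.mk p.2).getD q.1 0 = q.2 := by
      rcases q with ⟨a, b⟩
      exact PySem.Dict.getD_of_mem_items _ hq (by rw [PySem.Dict.keys_mk]; exact hin p hp) 0
    rw [hv2]; rfl
  refine (List.foldl_ext _ _ d hbody).trans ?_
  exact (pv_foldl_guard p.2 (fun q => q.2 < 3) (fun q => (q.1, (p.1, 3 - q.2))) pvGA d)

theorem pv_ga_gm (d : PySem.Dict String (List (String × Int))) (e : String × (String × Int))
    (h : ∀ c, (d.getD c ([] : List (String × Int))).Nodup) : pvGA d e = pvGM d e := by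
  unfold pvGA pvGM
  rw [PySem.Dict.modify]
  by_cases hc : d.contains e.1
  · simp only [hc, not_true_eq_false, if_false]
    rw [PySem.Set.ofList_eq_self_of_nodup _ (h e.1)]
  · simp only [hc, not_false_eq_true, if_true]
    rw [PySem.Dict.getD_of_not_contains _ _ (by simpa using hc)]
    rfl

theorem pv_inv_step (d : PySem.Dict String (List (String × Int))) (e : String × (String × Int))
    (h : ∀ c, (d.getD c ([] : List (String × Int))).Nodup) :
    ∀ c, ((pvGM d e).getD c ([] : List (String × Int))).Nodup := by
  intro c
  unfold pvGM
  rw [PySem.Dict.getD_modify]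
  split_ifs with hc
  · exact PySem.Set.nodup_add _ _ (h e.1)
  · exact h c

theorem pv_fold_eq (L : List (String × (String × Int))) (d : PySem.Dict String (List (String × Int)))
    (h : ∀ c, (d.getD c ([] : List (String × Int))).Nodup) :
    L.foldl pvGA d = L.foldl pvGM d := by
  induction L generalizing d with
  | nil => rfl
  | cons e L ih =>
      simp only [List.foldl_cons]
      rw [pv_ga_gm d e h]
      exact ih (pvGM d e) (pv_inv_step d e h)

theorem pv_getD_fold (L : List (String × (String × Int))) (d : PySem.Dict String (List (String × Int))) (c : String) :
    (L.foldl pvGM d).getD c [] =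
      ((L.filter (fun e => e.1 == c)).map (·.2)).foldl PySem.Set.add (d.getD c []) := by
  induction L generalizing d with
  | nil => rfl
  | cons e L ih =>
      simp only [List.foldl_cons, List.filter_cons]
      by_cases hc : e.1 = c
      · simp only [hc, beq_self_eq_true, if_true, List.map_cons, List.foldl_cons]
        rw [ih]
        congr 1
        unfold pvGM
        rw [PySem.Dict.getD_modify]
        simp [hc]
      · have : (e.1 == c) = false := by simpa using hc
        simp only [this, if_false]
        rw [ih]
        congr 1
        unfold pvGM
        rw [PySem.Dict.getD_modify]
        simp [Ne.symm hc]

theorem pv_keys_fold (L : List (String × (String × Int))) :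
    (L.foldl pvGM (PySem.Dict.empty : PySem.Dict String (List (String × Int)))).keys
      = PySem.Set.ofList (L.map (·.1)) := by
  have h := PySem.Dict.keys_foldl_modify_key L (fun e => e.1) ([] : List (String × Int))
    (fun _ e => fun s => PySem.Set.add s e.2) PySem.Dict.empty
  rw [show (fun (d : PySem.Dict String (List (String × Int))) (x : String × (String × Int)) =>
      d.modify x.1 [] ((fun _ e => fun s => PySem.Set.add s e.2) d x)) = pvGM from rfl] at h
  rw [h]
  rw [show (PySem.Dict.empty : PySem.Dict String (List (String × Int))).keys = [] from rfl]
  exact PySem.Set.update_nil_left _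

theorem pv_nodup_keys_fold (L : List (String × (String × Int))) :
    (L.foldl pvGM (PySem.Dict.empty : PySem.Dict String (List (String × Int)))).keys.Nodup := by
  have h := PySem.Dict.nodup_keys_foldl_modify_key L (fun e => e.1) ([] : List (String × Int))
    (fun _ e => fun s => PySem.Set.add s e.2) PySem.Dict.empty PySem.Dict.nodup_keys_empty
  rwa [show (fun (d : PySem.Dict String (List (String × Int))) (x : String × (String × Int)) =>
      d.modify x.1 [] ((fun _ e => fun s => PySem.Set.add s e.2) d x)) = pvGM from rfl] at h

theorem pv_A_items (L : List (String × (String × Int))) :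
    (L.foldl pvGM (PySem.Dict.empty : PySem.Dict String (List (String × Int)))).items
      = (PySem.Set.ofList (L.map (·.1))).map
          (fun y => (y, PySem.Set.ofList ((L.filter (fun e => e.1 == y)).map (·.2)))) := by
  rw [PySem.Dict.items_eq_map_keys _ (pv_nodup_keys_fold L) []]
  rw [pv_keys_fold]
  apply List.map_congr_left
  intro y _
  rw [pv_getD_fold, PySem.Dict.getD_empty, ← PySem.Set.ofList_eq_foldl]

theorem pv_defkeys (x : String) (inner : List (String × Int))
    (h : (inner.map (·.1)).Nodup) :
    (inner.map (·.1)).filter (fun y => (PySem.Dict.mk inner).getD y 0 < 3)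
      = (pvFp (x, inner)).map (·.1) := by
  rw [List.filter_map]
  rw [List.filter_congr (q := fun q => decide (q.2 < 3)) (fun q hq => by
    simp only [Function.comp]
    rw [PySem.Dict.getD_of_mem_items _ hq (by rw [PySem.Dict.keys_mk]; exact h) 0])]
  unfold pvFp
  rw [List.map_map]
  rfl

theorem pv_filter_nil (x y : String) (inner : List (String × Int))
    (h : y ∉ inner.map (·.1)) :
    (pvFp (x, inner)).filter (fun e => e.1 == y) = [] := by
  rw [List.filter_eq_nil_iff]
  intro e he
  unfold pvFp at he
  simp only [List.mem_map, List.mem_filter] at he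
  obtain ⟨q, ⟨hq, _⟩, rfl⟩ := he
  simp only [beq_iff_eq]
  intro hqy
  have hm : q.1 ∈ inner.map (·.1) := List.mem_map.mpr ⟨q, hq, rfl⟩
  exact h (hqy ▸ hm)

theorem pv_gather (x y : String) (inner : List (String × Int))
    (h : (inner.map (·.1)).Nodup) :
    (if ((PySem.Dict.mk inner).contains y && decide ((PySem.Dict.mk inner).getD y 0 < 3)) = true
       then [(x, 3 - (PySem.Dict.mk inner).getD y 0)] else ([] : List (String × Int)))
      = ((pvFp (x, inner)).filter (fun e => e.1 == y)).map (·.2) := by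
  induction inner with
  | nil => rfl
  | cons q rest ih =>
      obtain ⟨k, v⟩ := q
      have hcons : (PySem.Dict.mk ((k, v) :: rest)).contains y
          = ((k == y) || (PySem.Dict.mk rest).contains y) := by
        simp [PySem.Dict.contains, List.any_cons]
      have hfp : pvFp (x, (k, v) :: rest) =
          (if v < 3 then [(k, (x, 3 - v))] else []) ++ pvFp (x, rest) := by
        unfold pvFp
        by_cases h3 : v < 3 <;> simp [List.filter_cons, h3]
      by_cases hq : k = y
      · have hy : y ∉ rest.map (·.1) := by
          simp only [List.map_cons, List.nodup_cons] at h
          exact hq ▸ h.1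
        have hgd : (PySem.Dict.mk ((k, v) :: rest)).getD y 0 = v := by
          simp [PySem.Dict.getD, PySem.Dict.get?_mk_cons, hq]
        have hrest : (pvFp (x, rest)).filter (fun e => e.1 == y) = [] := pv_filter_nil x y rest hy
        rw [hfp, List.filter_append, hrest, List.append_nil, hcons, hgd]
        by_cases h3 : v < 3
        · simp [hq, h3]
        · simp [h3]
      · have hgd : (PySem.Dict.mk ((k, v) :: rest)).getD y 0 = (PySem.Dict.mk rest).getD y 0 := by
          simp [PySem.Dict.getD, PySem.Dict.get?_mk_cons, show (k == y) = false by simpa using hq]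
        have hno : ((if v < 3 then [(k, (x, 3 - v))] else ([] : List (String × (String × Int)))).filter
            (fun e => e.1 == y)) = [] := by
          by_cases h3 : v < 3 <;> simp [h3, hq]
        have h' : (rest.map (·.1)).Nodup := by
          simp only [List.map_cons, List.nodup_cons] at h; exact h.2
        rw [hfp, List.filter_append, hno, List.nil_append, hcons,
          show (k == y) = false by simpa using hq, hgd]
        simpa using ih h'

theorem pv_toList_if {c : Bool} {a : String × Int} :
    (if c = true then some a else none).toList = (if c = true then [a] else []) := by
  by_cases h : c = true <;> simp [h]

theorem pv_B_norm (db : List (String × List (String × Int))) (mh : Int)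
    (hdb : (db.map (·.1)).Nodup) (hin : ∀ p ∈ db, (p.2.map (·.1)).Nodup) :
    resupply_alt db mh
      = (PySem.Set.ofList ((pvE db).map (·.1))).map
          (fun y => (y, PySem.Set.ofList (((pvE db).filter (fun e => e.1 == y)).map (·.2)))) := by
  unfold resupply_alt
  dsimp only
  rw [PySem.Dict.keys_mk, List.flatMap_map]
  simp only [List.filterMap_map]
  have hv : ∀ p ∈ db, (PySem.Dict.mk db).getD p.1 [] = p.2 := fun p hp =>
    PySem.Dict.getD_of_mem_items _ hp (by rw [PySem.Dict.keys_mk]; exact hdb) []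
  have h1 : (db.flatMap (fun p =>
      ((PySem.Dict.mk ((PySem.Dict.mk db).getD p.1 [])).keys).filter
        (fun y => (PySem.Dict.mk ((PySem.Dict.mk db).getD p.1 [])).getD y 0 < 3)))
      = (pvE db).map (·.1) := by
    rw [pvE, List.map_flatMap]
    apply List.flatMap_congr
    intro p hp
    rw [hv p hp, PySem.Dict.keys_mk]
    exact pv_defkeys p.1 p.2 (hin p hp)
  have h2 : ∀ y : String,
      (db.filterMap (fun p =>
        if (PySem.Dict.mk ((PySem.Dict.mk db).getD p.1 [])).contains y
            && (PySem.Dict.mk ((PySem.Dict.mk db).getD p.1 [])).getD y 0 < 3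
        then some (p.1, 3 - (PySem.Dict.mk ((PySem.Dict.mk db).getD p.1 [])).getD y 0)
        else none))
      = ((pvE db).filter (fun e => e.1 == y)).map (·.2) := by
    intro y
    rw [pvE, List.filter_flatMap, List.map_flatMap]
    rw [List.filterMap_eq_flatMap_toList]
    apply List.flatMap_congr
    intro p hp
    rw [hv p hp, pv_toList_if, pv_gather p.1 y p.2 (hin p hp)]
  rw [h1]
  rw [show PySem.List.dedup ((pvE db).map (·.1)) = PySem.Set.ofList ((pvE db).map (·.1)) from rfl]
  apply List.map_congr_left
  intro y _
  simp only [Function.comp_def]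
  rw [h2 y]
-- ===== VERDICT (by name: the statement is the Claim_ definition above) =====
theorem resupply_spec : Claim_equal_resupply := by
  intro db must_have _hdom hpre
  obtain ⟨hdb, hin⟩ := hpre
  unfold Spec_resupply
  calc resupply db must_have
      = ((pvE db).foldl pvGA PySem.Dict.empty).items := pv_A_norm db must_have hdb hin
    _ = ((pvE db).foldl pvGM PySem.Dict.empty).items := by
        rw [pv_fold_eq _ _ (fun c => by rw [PySem.Dict.getD_empty]; exact List.nodup_nil)]
    _ = (PySem.Set.ofList ((pvE db).map (·.1))).map
          (fun y => (y, PySem.Set.ofList (((pvE db).filter (fun e => e.1 == y)).map (·.2)))) :=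
        pv_A_items (pvE db)
    _ = resupply_alt db must_have := (pv_B_norm db must_have hdb hin).symm
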